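-- pv_equiv track=rewrite | github.com/Yotter/symbolic-logic-validator | validity.py | removeOuterParens
-- ===== SOURCE A (Python) =====
-- OPENB = "("
--
-- CLOSEB = ")"
--
-- def removeOuterParens(chars):
-- 	"""Removes any redundant parentheses on the outer layer.
-- 	Assumes non-empty set of chars"""
-- 	while chars[0] == OPENB and chars[-1] == CLOSEB:
-- 		p = 0
-- 		earlyClose = False
-- 		for i, char in enumerate(chars):
-- 			if char == OPENB:
-- 				p += 1
-- 			elif char == CLOSEB:
-- 				p -= 1
-- 				if p == 0 and i != (len(chars) - 1):
-- 					earlyClose = True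
-- 		if earlyClose:
-- 			break
-- 		else:
-- 			chars.pop(0)
-- 			chars.pop(-1)
-- 	return chars
-- ===== SOURCE B (Python) =====
-- OPENB = "("
--
-- CLOSEB = ")"
--
-- def removeOuterParens(chars):
-- 	"""Removes any redundant parentheses on the outer layer.
-- 	Assumes non-empty set of chars.
--
-- 	Single pass instead of strip-and-rescan: after removing j outer layers the
-- 	list is chars[j:n-j], and one more layer can come off exactly when its first
-- 	char is '(', its last is ')', and the paren depth over the rest of the layer
-- 	never returns to the baseline j.  So count how many layers satisfy that,
-- 	using prefix depths and running minima, then remove them all with one slice.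
-- 	(Mutates chars in place via slice assignment, like the original's pops.)"""
-- 	n = len(chars)
-- 	l = 0
-- 	while l < n and chars[l] == OPENB:
-- 		l += 1
-- 	r = 0
-- 	while r < n and chars[n - 1 - r] == CLOSEB:
-- 		r += 1
-- 	limit = min(l, r)
-- 	# prefix depths: d[i] = depth after reading chars[0..i]
-- 	d = []
-- 	p = 0
-- 	for c in chars:
-- 		if c == OPENB:
-- 			p += 1
-- 		elif c == CLOSEB:
-- 			p -= 1
-- 		d.append(p)
-- 	# layer j (0-based) is removable iff min(d[j:n-1-j]) > j; find the
-- 	# outermost failing layer by widening the interval from the middle out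
-- 	m = n  # no depth exceeds n
-- 	for i in range(limit, n - 1 - limit):
-- 		if d[i] < m:
-- 			m = d[i]
-- 	k = limit
-- 	for j in range(limit - 1, -1, -1):
-- 		if d[j] < m:
-- 			m = d[j]
-- 		if d[n - 2 - j] < m:
-- 			m = d[n - 2 - j]
-- 		if m <= j:
-- 			k = j
-- 	chars[:] = chars[k:n - k]
-- 	return chars
-- ===== Notes on version B (the rewrite author's own statement) =====
-- stated objective: alternative
-- what changed: Replaced A's strip-one-layer-then-rescan-everything while loop by a single pass: compute prefix depths once, count the number k of removable outer layers (layer j is removable iff the depth strictly inside it never returns to j) with running minima, and remove all k layers with one slice; Pre_ excludes only the all-parenthesis lists '('*m+')'*m, on which A raises IndexError after stripping everything.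
import Mathlib
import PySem

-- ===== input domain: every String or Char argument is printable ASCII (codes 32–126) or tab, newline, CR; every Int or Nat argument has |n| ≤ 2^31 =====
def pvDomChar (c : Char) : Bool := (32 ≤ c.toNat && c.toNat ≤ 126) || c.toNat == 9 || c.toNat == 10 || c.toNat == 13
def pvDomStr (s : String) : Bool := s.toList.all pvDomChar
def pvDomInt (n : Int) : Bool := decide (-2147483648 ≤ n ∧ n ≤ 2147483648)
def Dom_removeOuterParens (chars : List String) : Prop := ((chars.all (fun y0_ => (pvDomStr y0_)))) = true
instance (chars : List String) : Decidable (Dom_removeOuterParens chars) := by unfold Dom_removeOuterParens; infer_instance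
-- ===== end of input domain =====

-- B replaces A's strip-one-layer-and-rescan while loop by one pass over prefix depths that
-- counts all strippable layers and removes them with a single slice.  A mutates the list in
-- place (pop); B's Python mutates it via one slice assignment; theorems are about the return value.

-- ===== PORT A =====
-- the inner 'for i, char in enumerate(chars)' loop of A: state (p, earlyClose)
def scanA (n : Int) : List String → Int → Int → Bool → Int × Bool
  | [], _, p, e => (p, e)
  | c :: rest, i, p, e =>
    if c = "(" then scanA n rest (i + 1) (p + 1) e
    else if c = ")" then
      scanA n rest (i + 1) (p - 1) (if p - 1 = 0 ∧ i ≠ n - 1 then true else e)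
    else scanA n rest (i + 1) p e

def removeOuterParens (chars : List String) : List String :=
  if h : PySem.List.pyGet? chars 0 = some "(" ∧ PySem.List.pyGet? chars (-1) = some ")" then
    let pe := scanA (chars.length : Int) chars 0 0 false
    if pe.2 then chars
    else removeOuterParens (chars.tail.dropLast)   -- chars.pop(0); chars.pop(-1)
  else chars
termination_by chars.length
decreasing_by
  have hne : chars ≠ [] := by
    intro hc; rw [hc] at h; simp [PySem.List.pyGet?] at h
  cases chars with
  | nil => exact absurd rfl hne
  | cons a t => simp [List.length_dropLast]

-- ===== PORT B =====
-- the 'while l < n and chars[l] == OPENB' counting loop, as recursion from the front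
def runOpen : List String → Int
  | [] => 0
  | c :: rest => if c = "(" then runOpen rest + 1 else 0

-- the 'while r < n and chars[n-1-r] == CLOSEB' loop: same scan over the reversed list
def runClose : List String → Int
  | [] => 0
  | c :: rest => if c = ")" then runClose rest + 1 else 0

-- the 'for c in chars: ... d.append(p)' loop building the prefix-depth list
def bDepths : List String → Int → List Int
  | [], _ => []
  | c :: rest, p =>
    let p' := if c = "(" then p + 1 else if c = ")" then p - 1 else p
    p' :: bDepths rest p'

def removeOuterParens_alt (chars : List String) : List String :=
  let n : Int := (chars.length : Int)
  let l := runOpen chars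
  let r := runClose chars.reverse
  let limit := min l r
  let d := bDepths chars 0
  let m0 := (PySem.List.pyRange limit (n - 1 - limit) 1).foldl
      (fun m i => if PySem.List.pyGetD d i 0 < m then PySem.List.pyGetD d i 0 else m) n
  let s := (PySem.List.pyRange (limit - 1) (-1) (-1)).foldl
      (fun (s : Int × Int) j =>
        let m1 := if PySem.List.pyGetD d j 0 < s.1 then PySem.List.pyGetD d j 0 else s.1
        let m2 := if PySem.List.pyGetD d (n - 2 - j) 0 < m1 then PySem.List.pyGetD d (n - 2 - j) 0 else m1
        (m2, if m2 ≤ j then j else s.2)) (m0, limit)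
  PySem.List.slice chars (some s.2) (some (n - s.2))

-- ===== PRECONDITION & SPEC =====
-- Pre_ excludes exactly the inputs on which A raises IndexError: the lists '('*m + ')'*m
-- (including the empty list), where stripping empties the list before chars[0] is re-read.
def Pre_removeOuterParens (chars : List String) : Prop :=
  chars ≠ List.replicate (chars.length / 2) "(" ++ List.replicate (chars.length / 2) ")"
instance (chars : List String) : Decidable (Pre_removeOuterParens chars) := by
  unfold Pre_removeOuterParens; infer_instance

def pvWitness_removeOuterParens : List String := ["(", "a", ")"]

def Spec_removeOuterParens (chars : List String) (out : List String) : Prop := out = removeOuterParens_alt chars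
instance (chars : List String) (out : List String) : Decidable (Spec_removeOuterParens chars out) := by unfold Spec_removeOuterParens; infer_instance

-- ===== CLAIM (what is proved, stated in full; the proofs are below) =====
def Claim_equal_removeOuterParens : Prop := ∀ (chars : List String), Dom_removeOuterParens chars → Pre_removeOuterParens chars → Spec_removeOuterParens chars (removeOuterParens chars)


-- ===== LEMMAS AND PROOFS =====

-- proof-side view of the countdown loop of B: process indices j-1, j-2, ..., 0
def kLoop (d : List Int) (n : Int) : Nat → Int × Int → Int × Int
  | 0, s => s
  | j+1, s =>
    let v := PySem.List.pyGetD d ((j : Nat) : Int) 0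
    let m1 := if v < s.1 then v else s.1
    let w := PySem.List.pyGetD d (n - 2 - ((j : Nat) : Int)) 0
    let m2 := if w < m1 then w else m1
    kLoop d n j (m2, if m2 ≤ ((j : Nat) : Int) then ((j : Nat) : Int) else s.2)

-- net paren-depth change of a segment
def tot : List String → Int
  | [] => 0
  | c :: rest => (if c = "(" then 1 else if c = ")" then -1 else 0) + tot rest

theorem length_bDepths : ∀ (l : List String) (p : Int), (bDepths l p).length = l.length := by
  intro l; induction l with
  | nil => intro p; simp [bDepths]
  | cons c t ih => intro p; simp [bDepths, ih]

theorem bDepths_append : ∀ (l1 l2 : List String) (p : Int),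
    bDepths (l1 ++ l2) p = bDepths l1 p ++ bDepths l2 (p + tot l1) := by
  intro l1
  induction l1 with
  | nil => intro l2 p; simp [bDepths, tot]
  | cons c t ih =>
    intro l2 p
    simp only [List.cons_append, bDepths, tot]
    rw [ih]
    have h : (if c = "(" then p + 1 else if c = ")" then p - 1 else p) + tot t
        = p + ((if c = "(" then 1 else if c = ")" then -1 else 0) + tot t) := by
      split_ifs <;> ring
    rw [h]

theorem bDepths_shift : ∀ (l : List String) (p : Int),
    bDepths l (p + 1) = (bDepths l p).map (· + 1) := by
  intro l
  induction l with
  | nil => intro p; simp [bDepths]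
  | cons c t ih =>
    intro p
    simp only [bDepths, List.map_cons]
    have h : (if c = "(" then p + 1 + 1 else if c = ")" then p + 1 - 1 else p + 1)
        = (if c = "(" then p + 1 else if c = ")" then p - 1 else p) + 1 := by
      split_ifs <;> ring
    rw [h, ih]

theorem bDepths_le : ∀ (l : List String) (p : Int), ∀ x ∈ bDepths l p, x ≤ p + l.length := by
  intro l
  induction l with
  | nil => intro p x hx; simp [bDepths] at hx
  | cons c t ih =>
    intro p x hx
    simp only [bDepths, List.mem_cons] at hx
    have hp' : (if c = "(" then p + 1 else if c = ")" then p - 1 else p) ≤ p + 1 := by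
      split_ifs <;> omega
    rcases hx with rfl | hx
    · simp only [List.length_cons]; push_cast; omega
    · have := ih _ x hx
      simp only [List.length_cons]; push_cast at this ⊢; omega

-- pyGetD with default 0 inherits bounds that hold for all elements
theorem pyGetD_ub (d : List Int) (c : Int) (h : ∀ x ∈ d, x ≤ c) (h0 : 0 ≤ c) (i : Int) :
    PySem.List.pyGetD d i 0 ≤ c := by
  by_cases hir : PySem.Raise.InRange d.length i
  · exact h _ (PySem.List.pyGetD_mem d 0 hir)
  · rw [PySem.List.pyGetD_of_none d i 0 ((PySem.List.pyGet?_eq_none_iff d i).mpr hir)]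
    exact h0

theorem pyGetD_lb (d : List Int) (h : ∀ x ∈ d, 0 ≤ x) (i : Int) :
    0 ≤ PySem.List.pyGetD d i 0 := by
  by_cases hir : PySem.Raise.InRange d.length i
  · exact h _ (PySem.List.pyGetD_mem d 0 hir)
  · rw [PySem.List.pyGetD_of_none d i 0 ((PySem.List.pyGet?_eq_none_iff d i).mpr hir)]

-- generic facts about the first (middle-minimum) loop of B
theorem foldl_minif_le_init (g : Int → Int) :
    ∀ (l : List Int) (m : Int), l.foldl (fun m i => if g i < m then g i else m) m ≤ m := by
  intro l
  induction l with
  | nil => intro m; simp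
  | cons x t ih =>
    intro m
    simp only [List.foldl_cons]
    by_cases hgx : g x < m
    · have := ih (g x)
      simp only [if_pos hgx]
      omega
    · have := ih m
      simp only [if_neg hgx]
      omega

theorem foldl_minif_le_mem (g : Int → Int) :
    ∀ (l : List Int) (m i : Int), i ∈ l →
      l.foldl (fun m i => if g i < m then g i else m) m ≤ g i := by
  intro l
  induction l with
  | nil => intro m i hi; simp at hi
  | cons x t ih =>
    intro m i hi
    simp only [List.foldl_cons]
    rcases List.mem_cons.mp hi with rfl | hi
    · by_cases hgx : g i < m
      · simpa [hgx] using foldl_minif_le_init g t (g i)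
      · have h1 := foldl_minif_le_init g t m
        simp only [if_neg hgx]
        omega
    · exact ih _ i hi

theorem foldl_minif_lb (g : Int → Int) (c : Int) :
    ∀ (l : List Int) (m : Int), (∀ i ∈ l, c ≤ g i) → c ≤ m →
      c ≤ l.foldl (fun m i => if g i < m then g i else m) m := by
  intro l
  induction l with
  | nil => intro m _ hm; simpa
  | cons x t ih =>
    intro m h hm
    simp only [List.foldl_cons]
    refine ih _ (fun i hi => h i (List.mem_cons_of_mem _ hi)) ?_
    have := h x List.mem_cons_self
    split_ifs <;> omega

-- the port's countdown foldl is kLoop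
theorem foldl_kLoop (d : List Int) (n : Int) : ∀ (j : Nat) (s : Int × Int),
    (PySem.List.pyRange (((j : Nat) : Int) - 1) (-1) (-1)).foldl
      (fun (s : Int × Int) jj =>
        let m1 := if PySem.List.pyGetD d jj 0 < s.1 then PySem.List.pyGetD d jj 0 else s.1
        let m2 := if PySem.List.pyGetD d (n - 2 - jj) 0 < m1 then PySem.List.pyGetD d (n - 2 - jj) 0 else m1
        (m2, if m2 ≤ jj then jj else s.2)) s = kLoop d n j s := by
  intro j
  induction j with
  | zero =>
    intro s
    rw [PySem.List.pyRange_neg_one_eq_nil (by norm_num)]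
    simp [kLoop]
  | succ j ih =>
    intro s
    have hc : ((((j + 1 : Nat)) : Int) - 1) = ((j : Nat) : Int) := by push_cast; ring
    rw [hc, PySem.List.pyRange_neg_one_cons (by omega)]
    simp only [List.foldl_cons]
    rw [ih]
    simp only [kLoop]

theorem kLoop_le_init (d : List Int) (n : Int) :
    ∀ (j : Nat) (m k : Int), (kLoop d n j (m, k)).1 ≤ m := by
  intro j
  induction j with
  | zero => intro m k; simp [kLoop]
  | succ j ih =>
    intro m k
    simp only [kLoop]
    refine le_trans (ih _ _) ?_
    split_ifs <;> omega

theorem kLoop_le_idx (d : List Int) (n : Int) :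
    ∀ (j j0 : Nat) (m k : Int), j0 < j →
      (kLoop d n j (m, k)).1 ≤ PySem.List.pyGetD d ((j0 : Nat) : Int) 0 ∧
      (kLoop d n j (m, k)).1 ≤ PySem.List.pyGetD d (n - 2 - ((j0 : Nat) : Int)) 0 := by
  intro j
  induction j with
  | zero => intro j0 m k h; omega
  | succ j ih =>
    intro j0 m k h
    rcases Nat.lt_succ_iff_lt_or_eq.mp h with h' | h'
    · simp only [kLoop]
      exact ih j0 _ _ h'
    · subst h'
      simp only [kLoop]
      constructor <;>
      · refine le_trans (kLoop_le_init d n _ _ _) ?_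
        split_ifs <;> omega

theorem kLoop_k_zero (d : List Int) (n : Int) :
    ∀ (j : Nat) (m k : Int), 1 ≤ j → (kLoop d n j (m, k)).1 ≤ 0 → (kLoop d n j (m, k)).2 = 0 := by
  intro j
  induction j with
  | zero => intro m k h; omega
  | succ j ih =>
    intro m k _ hm
    rcases Nat.eq_zero_or_pos j with rfl | hj
    · simp only [kLoop, Nat.cast_zero] at hm ⊢
      rw [if_pos hm]
    · simp only [kLoop] at hm ⊢
      exact ih _ _ hj hm

theorem kLoop_k_nonneg (d : List Int) (n : Int) :
    ∀ (j : Nat) (m k : Int), 0 ≤ k → 0 ≤ (kLoop d n j (m, k)).2 := by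
  intro j
  induction j with
  | zero => intro m k h; simpa [kLoop]
  | succ j ih =>
    intro m k h
    simp only [kLoop]
    refine ih _ _ ?_
    split_ifs <;> omega

theorem kLoop_k_le (d : List Int) (n : Int) :
    ∀ (j : Nat) (m k : Int), ((j : Nat) : Int) ≤ k → (kLoop d n j (m, k)).2 ≤ k := by
  intro j
  induction j with
  | zero => intro m k h; simp [kLoop]
  | succ j ih =>
    intro m k h
    push_cast at h
    simp only [kLoop]
    split_ifs <;> exact le_trans (ih _ _ (by omega)) (by omega)

theorem kLoop_m_lb (d : List Int) (n : Int) (hd : ∀ i : Int, 0 ≤ PySem.List.pyGetD d i 0) :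
    ∀ (j : Nat) (m k : Int), 0 ≤ m → 0 ≤ (kLoop d n j (m, k)).1 := by
  intro j
  induction j with
  | zero => intro m k h; simpa [kLoop]
  | succ j ih =>
    intro m k h
    simp only [kLoop]
    refine ih _ _ ?_
    have h1 := hd ((j : Nat) : Int)
    have h2 := hd (n - 2 - ((j : Nat) : Int))
    split_ifs <;> omega

-- one stripped layer shifts B's countdown loop by one, depths and indices moving together
theorem kLoop_shift (dI dc : List Int) (nI : Int)
    (hidx : ∀ i : Int, 0 ≤ i → i < nI → PySem.List.pyGetD dc (i + 1) 0 = PySem.List.pyGetD dI i 0 + 1)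
    (hbd : ∀ i : Int, PySem.List.pyGetD dI i 0 ≤ nI)
    (h0 : PySem.List.pyGetD dc 0 0 = 1) :
    ∀ (j : Nat) (m mI k : Int), ((j : Nat) : Int) + 1 ≤ nI →
      (m = mI + 1 ∨ (nI + 1 ≤ m ∧ nI ≤ mI)) →
      kLoop dc (nI + 2) (j + 1) (m, k + 1)
        = kLoop dc (nI + 2) 1 ((kLoop dI nI j (mI, k)).1 + 1, (kLoop dI nI j (mI, k)).2 + 1) := by
  intro j
  induction j with
  | zero =>
    intro m mI k h1 hrel
    rcases hrel with rfl | ⟨ha, hb⟩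
    · rfl
    · simp only [kLoop, Nat.cast_zero]
      rw [h0]
      have hm : (if (1:Int) < m then (1:Int) else m) = 1 := if_pos (by omega)
      have hmI : (if (1:Int) < mI + 1 then (1:Int) else mI + 1) = 1 := if_pos (by omega)
      rw [hm, hmI]
  | succ j ih =>
    intro m mI k h1 hrel
    have hjlt : ((j : Nat) : Int) < nI := by push_cast at h1; omega
    have hvj : PySem.List.pyGetD dc (((j+1 : Nat)) : Int) 0 = PySem.List.pyGetD dI ((j : Nat) : Int) 0 + 1 := by
      rw [show (((j+1 : Nat)) : Int) = ((j : Nat) : Int) + 1 by push_cast; ring]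
      exact hidx _ (by positivity) hjlt
    have hwj : PySem.List.pyGetD dc (nI + 2 - 2 - (((j+1 : Nat)) : Int)) 0
        = PySem.List.pyGetD dI (nI - 2 - ((j : Nat) : Int)) 0 + 1 := by
      rw [show nI + 2 - 2 - (((j+1 : Nat)) : Int) = (nI - 2 - ((j : Nat) : Int)) + 1 by push_cast; ring]
      exact hidx _ (by push_cast at h1 ⊢; omega) (by push_cast at h1 ⊢; omega)
    show kLoop dc (nI + 2) (j + 1) _ = _
    dsimp only
    simp only [hvj, hwj]
    set vI := PySem.List.pyGetD dI ((j : Nat) : Int) 0 with hvI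
    set wI := PySem.List.pyGetD dI (nI - 2 - ((j : Nat) : Int)) 0 with hwI
    have hbv : vI ≤ nI := hbd _
    have hbw : wI ≤ nI := hbd _
    have hm2 : (if wI + 1 < (if vI + 1 < m then vI + 1 else m) then wI + 1 else (if vI + 1 < m then vI + 1 else m))
        = (if wI < (if vI < mI then vI else mI) then wI else (if vI < mI then vI else mI)) + 1 := by
      rcases hrel with rfl | ⟨ha, hb⟩ <;> split_ifs <;> omega
    have hk2 : (if ((if wI < (if vI < mI then vI else mI) then wI else (if vI < mI then vI else mI)) + 1) ≤ (((j+1 : Nat)) : Int)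
          then (((j+1 : Nat)) : Int) else k + 1)
        = (if (if wI < (if vI < mI then vI else mI) then wI else (if vI < mI then vI else mI)) ≤ ((j : Nat) : Int)
          then ((j : Nat) : Int) else k) + 1 := by
      rw [show (((j+1 : Nat)) : Int) = ((j : Nat) : Int) + 1 by push_cast; ring]
      split_ifs <;> omega
    rw [hm2, hk2]
    rw [ih _ _ _ (by push_cast at h1 ⊢; omega) (Or.inl rfl)]
    rfl

-- same shift for the first (middle) loop of B
theorem minfold_shift (dI dc : List Int) (nI : Int)
    (hidx : ∀ i : Int, 0 ≤ i → i < nI → PySem.List.pyGetD dc (i + 1) 0 = PySem.List.pyGetD dI i 0 + 1)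
    (hbd : ∀ i : Int, PySem.List.pyGetD dI i 0 ≤ nI) :
    ∀ (len : Nat) (a m mI : Int), 0 ≤ a → a + len ≤ nI →
      (m = mI + 1 ∨ (nI + 1 ≤ m ∧ nI ≤ mI)) →
      (((PySem.List.pyRange (a + 1) (a + len + 1) 1).foldl
          (fun m i => if PySem.List.pyGetD dc i 0 < m then PySem.List.pyGetD dc i 0 else m) m)
        = ((PySem.List.pyRange a (a + len) 1).foldl
          (fun m i => if PySem.List.pyGetD dI i 0 < m then PySem.List.pyGetD dI i 0 else m) mI) + 1
      ∨ (nI + 1 ≤ (PySem.List.pyRange (a + 1) (a + len + 1) 1).foldl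
          (fun m i => if PySem.List.pyGetD dc i 0 < m then PySem.List.pyGetD dc i 0 else m) m
        ∧ nI ≤ (PySem.List.pyRange a (a + len) 1).foldl
          (fun m i => if PySem.List.pyGetD dI i 0 < m then PySem.List.pyGetD dI i 0 else m) mI)) := by
  intro len
  induction len with
  | zero =>
    intro a m mI h0a hab hrel
    rw [PySem.List.pyRange_one_eq_nil (by push_cast; omega),
        PySem.List.pyRange_one_eq_nil (by push_cast; omega)]
    simpa using hrel
  | succ len ih =>
    intro a m mI h0a hab hrel
    push_cast at hab
    have halt : a < nI := by omega
    rw [PySem.List.pyRange_one_cons (show a + 1 < a + ((len + 1 : Nat) : Int) + 1 by push_cast; omega),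
        PySem.List.pyRange_one_cons (show a < a + ((len + 1 : Nat) : Int) by push_cast; omega)]
    simp only [List.foldl_cons]
    rw [hidx a h0a halt]
    have hba := hbd a
    set vI := PySem.List.pyGetD dI a 0 with hvI
    have hrel' : (if vI + 1 < m then vI + 1 else m) = (if vI < mI then vI else mI) + 1 ∨
        (nI + 1 ≤ (if vI + 1 < m then vI + 1 else m) ∧ nI ≤ (if vI < mI then vI else mI)) := by
      rcases hrel with rfl | ⟨ha, hb⟩
      · left; split_ifs <;> omega
      · left; split_ifs <;> omega
    have hr1 : a + ((len + 1 : Nat) : Int) + 1 = (a + 1) + ((len : Nat) : Int) + 1 := by push_cast; ring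
    have hr2 : a + ((len + 1 : Nat) : Int) = (a + 1) + ((len : Nat) : Int) := by push_cast; ring
    rw [hr1, hr2, show a + 1 + 1 = (a + 1) + 1 from rfl]
    exact ih (a + 1) _ _ (by omega) (by omega) hrel'

-- run-length lemmas about the leading-'(' and trailing-')' counters
theorem runOpen_append (l : List String) (c : String) (hc : c ≠ "(") :
    runOpen (l ++ [c]) = runOpen l := by
  induction l with
  | nil => simp [runOpen, hc]
  | cons x rest ih => simp only [List.cons_append, runOpen]; rw [ih]

theorem runClose_append (l : List String) (c : String) (hc : c ≠ ")") :
    runClose (l ++ [c]) = runClose l := by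
  induction l with
  | nil => simp [runClose, hc]
  | cons x rest ih => simp only [List.cons_append, runClose]; rw [ih]

theorem runOpen_nonneg (l : List String) : 0 ≤ runOpen l := by
  induction l with
  | nil => simp [runOpen]
  | cons x rest ih => simp only [runOpen]; split_ifs <;> omega

theorem runClose_nonneg (l : List String) : 0 ≤ runClose l := by
  induction l with
  | nil => simp [runClose]
  | cons x rest ih => simp only [runClose]; split_ifs <;> omega

theorem runClose_le (l : List String) : runClose l ≤ (l.length : Int) := by
  induction l with
  | nil => simp [runClose]
  | cons x rest ih =>
    simp only [runClose, List.length_cons]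
    split_ifs <;> push_cast <;> omega

-- the leading-'(' and trailing-')' runs cannot overlap
theorem runSum_le (l : List String) : runOpen l + runClose l.reverse ≤ (l.length : Int) := by
  induction l with
  | nil => simp [runOpen, runClose]
  | cons c t ih =>
    by_cases hc : c = "("
    · simp only [runOpen, List.reverse_cons, hc]
      simp only [reduceIte]
      rw [runClose_append t.reverse "(" (by decide)]
      simp only [List.length_cons]
      push_cast; omega
    · simp only [runOpen, if_neg hc]
      have h2 := runClose_le (c :: t).reverse
      simp only [List.length_reverse] at h2
      omega

-- A's inner scan: once earlyClose is set it stays set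
theorem scanA_true (n : Int) : ∀ (l : List String) (i p : Int), (scanA n l i p true).2 = true := by
  intro l
  induction l with
  | nil => intro i p; simp [scanA]
  | cons c t ih =>
    intro i p
    simp only [scanA]
    split_ifs <;> simp [ih]

-- A's earlyClose over a segment strictly before the last index is 'some prefix depth drops to 0'
theorem scanA_early : ∀ (l : List String) (n i p : Int), 0 ≤ i → i + l.length ≤ n - 1 → 1 ≤ p →
    ((scanA n l i p false).2 = true ↔ ∃ x ∈ bDepths l p, x ≤ 0) := by
  intro l
  induction l with
  | nil => intro n i p _ _ _; simp [scanA, bDepths]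
  | cons c t ih =>
    intro n i p hi hlen hp
    have hlen' : (i + 1) + (t.length : Int) ≤ n - 1 := by
      push_cast [List.length_cons] at hlen; omega
    have hine : i ≠ n - 1 := by push_cast [List.length_cons] at hlen; omega
    by_cases hc1 : c = "("
    · simp only [scanA, bDepths, if_pos hc1]
      rw [ih n (i + 1) (p + 1) (by omega) hlen' (by omega)]
      constructor
      · intro h; exact ⟨_, List.mem_cons_of_mem _ h.choose_spec.1, h.choose_spec.2⟩
      · rintro ⟨x, hx, hx0⟩
        rcases List.mem_cons.mp hx with rfl | hx
        · omega
        · exact ⟨x, hx, hx0⟩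
    · by_cases hc2 : c = ")"
      · simp only [scanA, bDepths, if_neg hc1, if_pos hc2]
        by_cases hz : p - 1 = 0
        · rw [if_pos ⟨hz, hine⟩]
          rw [scanA_true]
          simp only [true_iff]
          exact ⟨p - 1, List.mem_cons_self, by omega⟩
        · rw [if_neg (by tauto)]
          rw [ih n (i + 1) (p - 1) (by omega) hlen' (by omega)]
          constructor
          · intro h; exact ⟨_, List.mem_cons_of_mem _ h.choose_spec.1, h.choose_spec.2⟩
          · rintro ⟨x, hx, hx0⟩
            rcases List.mem_cons.mp hx with rfl | hx
            · omega
            · exact ⟨x, hx, hx0⟩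
      · simp only [scanA, bDepths, if_neg hc1, if_neg hc2]
        rw [ih n (i + 1) p (by omega) hlen' (by omega)]
        constructor
        · intro h; exact ⟨_, List.mem_cons_of_mem _ h.choose_spec.1, h.choose_spec.2⟩
        · rintro ⟨x, hx, hx0⟩
          rcases List.mem_cons.mp hx with rfl | hx
          · omega
          · exact ⟨x, hx, hx0⟩

theorem scanA_append (l : List String) : ∀ (c : String) (n i p : Int) (e : Bool),
    scanA n (l ++ [c]) i p e
      = scanA n [c] (i + l.length) (scanA n l i p e).1 (scanA n l i p e).2 := by
  induction l with
  | nil => intro c n i p e; simp [scanA]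
  | cons x rest ih =>
    intro c n i p e
    have h1 : (i + ((x :: rest).length : Int)) = (i + 1) + (rest.length : Int) := by
      push_cast [List.length_cons]; ring
    rw [h1]
    simp only [List.cons_append, scanA]
    split_ifs <;> (rw [ih]; simp only [scanA]) <;> simp_all

-- the last character of the list never sets earlyClose
theorem scanA_last (c : String) (n p : Int) (e : Bool) : (scanA n [c] (n - 1) p e).2 = e := by
  simp [scanA]
  split_ifs <;> rfl

-- packaged form of B's computation: middle minimum, then the countdown loop as kLoop
def altM0 (chars : List String) : Int :=
  (PySem.List.pyRange (min (runOpen chars) (runClose chars.reverse))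
      ((chars.length : Int) - 1 - min (runOpen chars) (runClose chars.reverse)) 1).foldl
    (fun m i => if PySem.List.pyGetD (bDepths chars 0) i 0 < m then PySem.List.pyGetD (bDepths chars 0) i 0 else m)
    (chars.length : Int)

def altK (chars : List String) : Int :=
  (kLoop (bDepths chars 0) (chars.length : Int) (min (runOpen chars) (runClose chars.reverse)).toNat
     (altM0 chars, min (runOpen chars) (runClose chars.reverse))).2

theorem alt_eq_kLoop (chars : List String) :
    removeOuterParens_alt chars
      = PySem.List.slice chars (some (altK chars)) (some ((chars.length : Int) - altK chars)) := by
  have hnn : 0 ≤ min (runOpen chars) (runClose chars.reverse) :=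
    le_min (runOpen_nonneg _) (runClose_nonneg _)
  simp only [removeOuterParens_alt, altK, altM0]
  rw [← foldl_kLoop]
  rw [Int.toNat_of_nonneg hnn]

theorem alt_of_k0 (chars : List String) (h : altK chars = 0) :
    removeOuterParens_alt chars = chars := by
  rw [alt_eq_kLoop, h]
  rw [show (chars.length : Int) - 0 = ((chars.length : Nat) : Int) by ring]
  simp [PySem.List.slice_to_natCast]

theorem altK_of_limit0 (chars : List String)
    (h : min (runOpen chars) (runClose chars.reverse) = 0) : altK chars = 0 := by
  simp [altK, h, kLoop]

theorem dc_shape (inner : List String) :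
    bDepths ("(" :: (inner ++ [")"])) 0 = 1 :: ((bDepths inner 0).map (· + 1) ++ [tot inner]) := by
  simp only [bDepths, reduceIte]
  rw [show (0 : Int) + 1 = 1 from rfl]
  rw [bDepths_append]
  rw [show (1 : Int) = 0 + 1 from rfl, bDepths_shift]
  simp [bDepths]

theorem hidx_shape (inner : List String) : ∀ i : Int, 0 ≤ i → i < (inner.length : Int) →
    PySem.List.pyGetD (bDepths ("(" :: (inner ++ [")"])) 0) (i + 1) 0
      = PySem.List.pyGetD (bDepths inner 0) i 0 + 1 := by
  intro i h0 hlt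
  obtain ⟨iN, rfl⟩ := Int.eq_ofNat_of_zero_le h0
  have hiN : iN < inner.length := by exact_mod_cast hlt
  have hlenI : ((bDepths inner 0).map (· + 1)).length = inner.length := by
    simp [length_bDepths]
  rw [dc_shape]
  rw [show ((iN : Int) + 1) = (((iN + 1 : Nat)) : Int) by push_cast; ring]
  rw [PySem.List.pyGetD_natCast, PySem.List.pyGetD_natCast]
  rw [List.getD_cons_succ]
  rw [List.getD_eq_getElem?_getD, List.getD_eq_getElem?_getD]
  rw [List.getElem?_append_left (by omega)]
  rw [List.getElem?_map]
  rw [List.getElem?_eq_getElem (by rw [length_bDepths]; omega)]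
  simp

theorem limit_shape (inner : List String) :
    min (runOpen ("(" :: (inner ++ [")"]))) (runClose (("(" :: (inner ++ [")"])).reverse))
      = min (runOpen inner) (runClose inner.reverse) + 1 := by
  have hro : runOpen ("(" :: (inner ++ [")"])) = runOpen inner + 1 := by
    simp only [runOpen, reduceIte]
    rw [runOpen_append inner ")" (by decide)]
  have hrc : runClose (("(" :: (inner ++ [")"])).reverse) = runClose inner.reverse + 1 := by
    rw [show ("(" :: (inner ++ [")"])).reverse = ")" :: (inner.reverse ++ ["("]) by simp]
    simp only [runClose, reduceIte]
    rw [runClose_append inner.reverse "(" (by decide)]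
  rw [hro, hrc, min_add_add_right]

theorem altK_cons (inner : List String) :
    altK ("(" :: (inner ++ [")"])) =
      (kLoop (bDepths ("(" :: (inner ++ [")"])) 0) ((inner.length : Int) + 2)
        ((min (runOpen inner) (runClose inner.reverse)).toNat + 1)
        (altM0 ("(" :: (inner ++ [")"])), min (runOpen inner) (runClose inner.reverse) + 1)).2 := by
  have hnn : 0 ≤ min (runOpen inner) (runClose inner.reverse) :=
    le_min (runOpen_nonneg _) (runClose_nonneg _)
  simp only [altK]
  rw [limit_shape]
  rw [show (("(" :: (inner ++ [")"])).length : Int) = (inner.length : Int) + 2 by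
    push_cast [List.length_cons, List.length_append, List.length_nil]; ring]
  rw [show (min (runOpen inner) (runClose inner.reverse) + 1).toNat
      = (min (runOpen inner) (runClose inner.reverse)).toNat + 1 by omega]

theorem altM0_cons (inner : List String) :
    altM0 ("(" :: (inner ++ [")"])) =
      (PySem.List.pyRange (min (runOpen inner) (runClose inner.reverse) + 1)
          ((inner.length : Int) - min (runOpen inner) (runClose inner.reverse)) 1).foldl
        (fun m i => if PySem.List.pyGetD (bDepths ("(" :: (inner ++ [")"])) 0) i 0 < m
                    then PySem.List.pyGetD (bDepths ("(" :: (inner ++ [")"])) 0) i 0 else m)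
        ((inner.length : Int) + 2) := by
  simp only [altM0]
  rw [limit_shape]
  rw [show (("(" :: (inner ++ [")"])).length : Int) = (inner.length : Int) + 2 by
    push_cast [List.length_cons, List.length_append, List.length_nil]; ring]
  rw [show (inner.length : Int) + 2 - 1 - (min (runOpen inner) (runClose inner.reverse) + 1)
      = (inner.length : Int) - min (runOpen inner) (runClose inner.reverse) by ring]

theorem dI_ub (inner : List String) : ∀ i : Int,
    PySem.List.pyGetD (bDepths inner 0) i 0 ≤ (inner.length : Int) := by
  refine pyGetD_ub _ _ (fun x hx => ?_) (by positivity)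
  have := bDepths_le inner 0 x hx
  omega

theorem h0_shape (inner : List String) :
    PySem.List.pyGetD (bDepths ("(" :: (inner ++ [")"])) 0) 0 0 = 1 := by
  rw [dc_shape]
  exact PySem.List.pyGetD_zero_cons _ _ _

theorem m0I_nonneg (inner : List String)
    (hlb : ∀ i : Int, 0 ≤ PySem.List.pyGetD (bDepths inner 0) i 0) : 0 ≤ altM0 inner := by
  simp only [altM0]
  exact foldl_minif_lb _ 0 _ _ (fun i _ => hlb i) (by positivity)

theorem altK_strip (inner : List String) (hne : inner ≠ [])
    (hpos : ∀ x ∈ bDepths inner 0, 0 ≤ x) :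
    altK ("(" :: (inner ++ [")"])) = altK inner + 1 := by
  set nI : Int := (inner.length : Int) with hnI
  set limI : Int := min (runOpen inner) (runClose inner.reverse) with hlimI
  have hnn : 0 ≤ limI := le_min (runOpen_nonneg _) (runClose_nonneg _)
  have hnI1 : 1 ≤ nI := by
    have : inner.length ≠ 0 := fun h => hne (List.eq_nil_of_length_eq_zero h)
    omega
  have hsum := runSum_le inner
  have hl1 : limI ≤ runOpen inner := min_le_left _ _
  have hl2 : limI ≤ runClose inner.reverse := min_le_right _ _
  have hlo := runOpen_nonneg inner
  have hlc := runClose_nonneg inner.reverse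
  have h2lim : 2 * limI ≤ nI := by omega
  have hlb : ∀ i : Int, 0 ≤ PySem.List.pyGetD (bDepths inner 0) i 0 := pyGetD_lb _ hpos
  have hbd : ∀ i : Int, PySem.List.pyGetD (bDepths inner 0) i 0 ≤ nI := dI_ub inner
  have hidx := hidx_shape inner
  have hm0 : (altM0 ("(" :: (inner ++ [")"])) = altM0 inner + 1
      ∨ (nI + 1 ≤ altM0 ("(" :: (inner ++ [")"])) ∧ nI ≤ altM0 inner)) := by
    rw [altM0_cons]
    simp only [altM0, ← hnI, ← hlimI]
    rw [show nI - 1 - limI = limI + (nI - 1 - 2 * limI) by ring]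
    by_cases hmid : limI ≤ nI - 1 - limI
    · obtain ⟨len, hlen⟩ := Int.eq_ofNat_of_zero_le (show (0:Int) ≤ nI - 1 - 2 * limI by omega)
      rw [hlen]
      rw [show nI - limI = limI + (len : Int) + 1 by omega]
      exact minfold_shift _ _ nI hidx hbd len limI _ _ hnn (by omega) (Or.inr ⟨by omega, le_refl _⟩)
    · rw [PySem.List.pyRange_one_eq_nil (by omega), PySem.List.pyRange_one_eq_nil (by omega)]
      simp only [List.foldl_nil]
      exact Or.inr ⟨by omega, le_refl _⟩
  rw [altK_cons]
  rw [show (inner.length : Int) + 2 = nI + 2 from rfl]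
  rw [kLoop_shift _ _ nI hidx hbd (h0_shape inner) limI.toNat _ _ limI
      (by rw [Int.toNat_of_nonneg hnn]; omega) hm0]
  simp only [kLoop, Nat.cast_zero]
  rw [h0_shape]
  rw [show nI + 2 - 2 - 0 = (nI - 1) + 1 by ring]
  rw [hidx (nI - 1) (by omega) (by omega)]
  have hA : 0 ≤ (kLoop (bDepths inner 0) nI limI.toNat (altM0 inner, limI)).1 :=
    kLoop_m_lb _ _ hlb _ _ _ (m0I_nonneg inner hlb)
  have hB := hlb (nI - 1)
  rw [if_neg (by split_ifs <;> omega)]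
  simp only [altK, ← hnI, ← hlimI]

theorem altK_zero_of_bad (inner : List String) (iN : Nat) (hiN : iN < inner.length)
    (hbad : (bDepths inner 0).getD iN 0 + 1 ≤ 0) :
    altK ("(" :: (inner ++ [")"])) = 0 := by
  set nI : Int := (inner.length : Int) with hnI
  set limI : Int := min (runOpen inner) (runClose inner.reverse) with hlimI
  have hnn : 0 ≤ limI := le_min (runOpen_nonneg _) (runClose_nonneg _)
  have hnI1 : 1 ≤ nI := by omega
  have hsum := runSum_le inner
  have hl1 : limI ≤ runOpen inner := min_le_left _ _
  have hl2 : limI ≤ runClose inner.reverse := min_le_right _ _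
  have hlo := runOpen_nonneg inner
  have hlc := runClose_nonneg inner.reverse
  have h2lim : 2 * limI ≤ nI := by omega
  have hidx := hidx_shape inner
  have hbadc : PySem.List.pyGetD (bDepths ("(" :: (inner ++ [")"])) 0) ((iN : Int) + 1) 0 ≤ 0 := by
    rw [hidx (iN : Int) (by positivity) (by exact_mod_cast hiN)]
    rw [PySem.List.pyGetD_natCast]
    omega
  rw [altK_cons]
  refine kLoop_k_zero _ _ _ _ _ (by omega) ?_
  by_cases hb1 : ((iN : Int) + 1) < limI + 1
  · have h := kLoop_le_idx (bDepths ("(" :: (inner ++ [")"])) 0) ((inner.length : Int) + 2)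
      (limI.toNat + 1) (iN + 1) (altM0 ("(" :: (inner ++ [")"]))) (limI + 1) (by omega)
    have h1 := h.1
    rw [show (((iN + 1 : Nat)) : Int) = (iN : Int) + 1 by push_cast; ring] at h1
    exact le_trans h1 hbadc
  · by_cases hb2 : ((iN : Int) + 1) < nI - limI
    · have hmem : ((iN : Int) + 1) ∈ PySem.List.pyRange (limI + 1) (nI - limI) 1 :=
        (PySem.List.mem_pyRange_one).mpr ⟨by omega, hb2⟩
      have h1 : altM0 ("(" :: (inner ++ [")"])) ≤ 0 := by
        rw [altM0_cons]
        exact le_trans (foldl_minif_le_mem _ _ _ _ hmem) hbadc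
      exact le_trans (kLoop_le_init _ _ _ _ _) h1
    · set j0 : Nat := (nI - 1 - (iN : Int)).toNat with hj0
      have hj0v : ((j0 : Nat) : Int) = nI - 1 - (iN : Int) := by
        rw [hj0]; rw [Int.toNat_of_nonneg (by omega)]
      have h := kLoop_le_idx (bDepths ("(" :: (inner ++ [")"])) 0) ((inner.length : Int) + 2)
        (limI.toNat + 1) j0 (altM0 ("(" :: (inner ++ [")"]))) (limI + 1) (by omega)
      have h2 := h.2
      rw [hj0v, show (inner.length : Int) + 2 - 2 - (nI - 1 - (iN : Int)) = (iN : Int) + 1 by omega] at h2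
      exact le_trans h2 hbadc

theorem slice_strip (inner : List String) (K : Int) (h0 : 0 ≤ K) (h2 : 2 * K ≤ (inner.length : Int)) :
    PySem.List.slice ("(" :: (inner ++ [")"])) (some (K + 1))
        (some ((("(" :: (inner ++ [")"])).length : Int) - (K + 1)))
      = PySem.List.slice inner (some K) (some ((inner.length : Int) - K)) := by
  obtain ⟨KN, rfl⟩ := Int.eq_ofNat_of_zero_le h0
  have hKN : 2 * KN ≤ inner.length := by exact_mod_cast h2
  rw [PySem.List.slice_toNat _ (by omega) (by push_cast [List.length_cons, List.length_append, List.length_nil]; omega),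
      PySem.List.slice_toNat _ (by omega) (by omega)]
  rw [show ((KN : Int) + 1).toNat = KN + 1 by omega]
  rw [show ((("(" :: (inner ++ [")"])).length : Int) - ((KN : Int) + 1)).toNat
      = inner.length + 1 - KN by push_cast [List.length_cons, List.length_append, List.length_nil]; omega]
  rw [show ((inner.length : Int) - (KN : Int)).toNat = inner.length - KN by omega]
  rw [show ((KN : Int)).toNat = KN by omega]
  rw [List.drop_succ_cons]
  rw [List.drop_append_of_le_length (by omega)]
  rw [show inner.length + 1 - KN - (KN + 1) = inner.length - KN - KN by omega]
  rw [List.take_append_of_le_length (by push_cast [List.length_drop]; omega)]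

theorem altK_nonneg (chars : List String) : 0 ≤ altK chars :=
  kLoop_k_nonneg _ _ _ _ _ (le_min (runOpen_nonneg _) (runClose_nonneg _))

theorem altK_le_limit (chars : List String) :
    altK chars ≤ min (runOpen chars) (runClose chars.reverse) := by
  have hnn : 0 ≤ min (runOpen chars) (runClose chars.reverse) :=
    le_min (runOpen_nonneg _) (runClose_nonneg _)
  exact kLoop_k_le _ _ _ _ _ (by rw [Int.toNat_of_nonneg hnn])

theorem main_aux : ∀ (N : Nat) (chars : List String), chars.length ≤ N →
    removeOuterParens chars = removeOuterParens_alt chars := by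
  intro N
  induction N with
  | zero =>
    intro chars hlen
    have h0 : chars = [] := List.eq_nil_of_length_eq_zero (Nat.le_zero.mp hlen)
    subst h0
    rw [removeOuterParens]
    norm_num [PySem.List.pyGet?]
    decide
  | succ N ih =>
    intro chars hlen
    rw [removeOuterParens]
    by_cases hg : (PySem.List.pyGet? chars 0 = some "(" ∧ PySem.List.pyGet? chars (-1) = some ")")
    · rw [dif_pos hg]
      obtain ⟨inner, rfl⟩ : ∃ inner, chars = "(" :: (inner ++ [")"]) := by
        obtain ⟨hg0, hg1⟩ := hg
        rcases chars with _ | ⟨c, t⟩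
        · simp [PySem.List.pyGet?] at hg0
        · rw [PySem.List.pyGet?_zero] at hg0
          simp at hg0
          rw [PySem.List.pyGet?_neg_one] at hg1
          rcases t.eq_nil_or_concat with rfl | ⟨mid, z, rfl⟩
          · simp_all
          · refine ⟨mid, ?_⟩
            have hzl : (c :: mid.concat z).getLast? = some z := by
              rw [show c :: mid.concat z = (c :: mid) ++ [z] by simp [List.concat_eq_append]]
              exact List.getLast?_concat
            rw [hzl] at hg1
            simp at hg1
            rw [hg0, hg1]
            simp [List.concat_eq_append]
      set nI : Int := (inner.length : Int) with hnI
      have hlen2 : ((("(" :: (inner ++ [")"])).length : Nat) : Int) = nI + 2 := by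
        push_cast [List.length_cons, List.length_append, List.length_nil]; ring
      set n : Int := ((("(" :: (inner ++ [")"])).length : Nat) : Int) with hn
      have hfirst : scanA n ("(" :: inner) 0 0 false = scanA n inner 1 1 false := by
        simp [scanA]
      have he2 : (scanA n ("(" :: (inner ++ [")"])) 0 0 false).2 = (scanA n inner 1 1 false).2 := by
        have h1 : ("(" :: (inner ++ [")"])) = ("(" :: inner) ++ [")"] := by simp
        rw [h1, scanA_append]
        rw [show (0 : Int) + ((("(" :: inner).length : Nat) : Int) = (inner.length : Int) + 1 by
          push_cast [List.length_cons]; ring, hfirst]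
        rw [show (inner.length : Int) + 1 = n - 1 by omega]
        exact scanA_last _ _ _ _
      have hiff := scanA_early inner n 1 1 (by omega) (by omega) (le_refl _)
      have hmap : bDepths inner 1 = (bDepths inner 0).map (· + 1) := by
        have h := bDepths_shift inner 0
        rwa [zero_add] at h
      dsimp only
      rw [he2]
      rcases he1 : (scanA n inner 1 1 false).2 with _ | _
      · -- earlyClose false: A strips one layer and recurses
        simp only [Bool.false_eq_true, if_false]
        rw [show ("(" :: (inner ++ [")"])).tail.dropLast = inner by simp]
        have hpos : ∀ x ∈ bDepths inner 0, 0 ≤ x := by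
          intro x hx
          by_contra hxneg
          have : (scanA n inner 1 1 false).2 = true := by
            rw [hiff, hmap]
            exact ⟨x + 1, List.mem_map_of_mem hx, by omega⟩
          rw [he1] at this
          exact absurd this (by simp)
        rw [ih inner (by simp only [List.length_cons, List.length_append] at hlen; omega)]
        rcases List.eq_nil_or_concat' inner with rfl | ⟨mid, z, hmz⟩
        · decide
        · have hne : inner ≠ [] := by rw [hmz]; simp
          rw [alt_eq_kLoop inner, alt_eq_kLoop ("(" :: (inner ++ [")"]))]
          rw [altK_strip inner hne hpos]
          have hK0 := altK_nonneg inner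
          have hKle := altK_le_limit inner
          have hsum := runSum_le inner
          have hl1 : min (runOpen inner) (runClose inner.reverse) ≤ runOpen inner := min_le_left _ _
          have hl2 : min (runOpen inner) (runClose inner.reverse) ≤ runClose inner.reverse := min_le_right _ _
          exact (slice_strip inner (altK inner) hK0 (by omega)).symm
      · -- earlyClose true: both sides return the input unchanged
        simp only [if_true]
        have hex : ∃ x ∈ bDepths inner 1, x ≤ 0 := by rw [← hiff, he1]
        rw [hmap] at hex
        obtain ⟨x, hx, hx0⟩ := hex
        obtain ⟨y, hy, rfl⟩ := List.mem_map.mp hx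
        obtain ⟨iN, hiN, hyv⟩ := List.mem_iff_getElem.mp hy
        have hbad : (bDepths inner 0).getD iN 0 + 1 ≤ 0 := by
          rw [List.getD_eq_getElem?_getD, List.getElem?_eq_getElem hiN]
          simp only [Option.getD_some]
          omega
        have hiN' : iN < inner.length := by
          have := hiN; rwa [length_bDepths] at this
        exact (alt_of_k0 _ (altK_zero_of_bad inner iN hiN' hbad)).symm
    · rw [dif_neg hg]
      have hz : runOpen chars = 0 ∨ runClose chars.reverse = 0 := by
        rcases chars with _ | ⟨c, t⟩
        · left; simp [runOpen]
        · by_cases hc : c = "("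
          · right
            have hget0 : PySem.List.pyGet? (c :: t) 0 = some "(" := by
              rw [PySem.List.pyGet?_zero]; simp [hc]
            have hlast : ¬ PySem.List.pyGet? (c :: t) (-1) = some ")" := fun hl => hg ⟨hget0, hl⟩
            rw [PySem.List.pyGet?_neg_one] at hlast
            rcases (c :: t).eq_nil_or_concat with h0 | ⟨mid, z, hmz⟩
            · simp at h0
            · have hz : z ≠ ")" := by
                intro hz; apply hlast; rw [hmz]
                rw [show (mid.concat z) = mid ++ [z] by simp [List.concat_eq_append]]
                simp [hz]
              rw [hmz]
              rw [show (mid.concat z) = mid ++ [z] by simp [List.concat_eq_append]]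
              simp only [List.reverse_append, List.reverse_cons, List.reverse_nil, List.nil_append,
                List.cons_append, runClose]
              simp [hz]
          · left; simp [runOpen, hc]
      have hlim0 : min (runOpen chars) (runClose chars.reverse) = 0 := by
        have h1 := runOpen_nonneg chars
        have h2 := runClose_nonneg chars.reverse
        rcases hz with hz | hz
        · rw [hz]; exact min_eq_left h2
        · rw [hz]; exact min_eq_right h1
      exact (alt_of_k0 _ (altK_of_limit0 _ hlim0)).symm

theorem main_eq (chars : List String) : removeOuterParens chars = removeOuterParens_alt chars :=
  main_aux chars.length chars le_rfl

-- ===== VERDICT (by name: the statement is the Claim_ definition above) =====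
theorem removeOuterParens_spec : Claim_equal_removeOuterParens := by
  intro chars _ _
  unfold Spec_removeOuterParens
  exact main_eq chars
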